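-- pv_equiv track=rewrite | github.com/szaboildi/transcribed-corpus-tools | Scripts/nk_transcriber.py | palatal_assim
-- ===== SOURCE A (Python) =====
-- def palatal_assim(word):
--     """
--     Transcribes palatal assimilation for a Nkore-Kiga word
--     :param word: Pre-processed word to perform palatal assimilation on.
--     :return: Word after assimilation
--     """
--     # What happens with kI, ke, gI, ge?
--     pal_dict = {
--         u'ki': u'T',
--         u'kI': u'Ti',
--         u'kj': u'T',
--         u'ky': u'T',
--         u'gi': u'D',
--         u'gj': u'D',
--         u'gy': u'D',
--         u'gI': u'Di'
--     }
--
--     for string in pal_dict: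
--         word = word.replace(string, pal_dict[string])
--
--     return word
-- ===== SOURCE B (Python) =====
-- def palatal_assim(word):
--     """Single left-to-right pass: test each 2-char window against the table once."""
--     pal_dict = {
--         u'ki': u'T',
--         u'kI': u'Ti',
--         u'kj': u'T',
--         u'ky': u'T',
--         u'gi': u'D',
--         u'gj': u'D',
--         u'gy': u'D',
--         u'gI': u'Di',
--     }
--     out = []
--     i = 0
--     n = len(word)
--     while i < n:
--         rep = pal_dict.get(word[i:i + 2])
--         if rep is None:
--             out.append(word[i])
--             i += 1
--         else:
--             out.append(rep)
--             i += 2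
--     return ''.join(out)
-- ===== Notes on version B (the rewrite author's own statement) =====
-- stated objective: alternative
-- what changed: B builds the result in a single left-to-right scan, testing each 2-character window against the substitution table once and emitting either the replacement or the current character, instead of A's eight sequential full-string replace passes.
import Mathlib
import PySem

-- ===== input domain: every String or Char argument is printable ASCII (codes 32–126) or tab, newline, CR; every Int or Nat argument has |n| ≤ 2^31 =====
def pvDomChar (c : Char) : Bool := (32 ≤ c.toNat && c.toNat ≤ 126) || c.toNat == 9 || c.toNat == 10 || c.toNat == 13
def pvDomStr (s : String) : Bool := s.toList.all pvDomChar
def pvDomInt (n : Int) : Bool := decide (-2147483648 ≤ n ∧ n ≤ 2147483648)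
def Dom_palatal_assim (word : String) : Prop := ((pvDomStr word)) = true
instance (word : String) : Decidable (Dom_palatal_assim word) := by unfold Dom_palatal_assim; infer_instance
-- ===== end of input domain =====

-- B replaces A's eight sequential full-string replace passes by a single left-to-right
-- scan with one dictionary lookup per position (objective: alternative single-pass algorithm).


-- ===== PORT A =====
-- pal_dict, in insertion order
def palDict : PySem.Dict String String :=
  PySem.Dict.mk [("ki","T"),("kI","Ti"),("kj","T"),("ky","T"),("gi","D"),("gj","D"),("gy","D"),("gI","Di")]

-- for string in pal_dict: word = word.replace(string, pal_dict[string])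
def palatal_assim (word : String) : String :=
  palDict.items.foldl (fun w kv => PySem.Str.replace w kv.1 kv.2) word

-- ===== PORT B =====
-- the same table, keys/values as char lists
def palDictAlt : PySem.Dict (List Char) (List Char) :=
  PySem.Dict.mk [(['k','i'],['T']),(['k','I'],['T','i']),(['k','j'],['T']),(['k','y'],['T']),
                 (['g','i'],['D']),(['g','j'],['D']),(['g','y'],['D']),(['g','I'],['D','i'])]

-- the while loop: at position i test word[i:i+2]; matched → emit replacement, i += 2; else emit word[i], i += 1
def altGo : List Char → List Char
  | [] => []
  | c :: rest =>
    match palDictAlt.get? ((c :: rest).take 2) with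
    | some rep => rep ++ altGo (rest.drop 1)
    | none => c :: altGo rest
termination_by l => l.length
decreasing_by all_goals first | (simp; omega) | simp

def palatal_assim_alt (word : String) : String :=
  String.ofList (altGo word.toList)

-- ===== PRECONDITION & SPEC =====
def Spec_palatal_assim (word : String) (out : String) : Prop := out = palatal_assim_alt word
instance (word : String) (out : String) : Decidable (Spec_palatal_assim word out) := by unfold Spec_palatal_assim; infer_instance

-- ===== CLAIM (what is proved, stated in full; the proofs are below) =====
def Claim_equal_palatal_assim : Prop := ∀ (word : String), Dom_palatal_assim word → Spec_palatal_assim word (palatal_assim word)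

-- ===== LEMMAS AND PROOFS =====

-- A clean recursion computing str.replace for a two-character pattern (proof-side model of PySem.Chars.replace)
def replF (p1 p2 : Char) (n : List Char) : List Char → List Char
  | [] => []
  | [c] => [c]
  | c :: d :: l => if c = p1 ∧ d = p2 then n ++ replF p1 p2 n l else c :: replF p1 p2 n (d :: l)
termination_by l => l.length

lemma replF_match (p1 p2 : Char) (n l) : replF p1 p2 n (p1 :: p2 :: l) = n ++ replF p1 p2 n l := by
  simp [replF]

lemma replF_cons_ne (p1 p2 c : Char) (n l) (h : c ≠ p1) :
    replF p1 p2 n (c :: l) = c :: replF p1 p2 n l := by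
  cases l with
  | nil => simp [replF]
  | cons d t => simp [replF, h]

lemma replF_cons_head (p1 p2 c : Char) (n l) (h : l.head? ≠ some p2) :
    replF p1 p2 n (c :: l) = c :: replF p1 p2 n l := by
  cases l with
  | nil => simp [replF]
  | cons d t =>
      have hd : d ≠ p2 := by simpa using h
      simp [replF, hd]

lemma replF_head_mem (p1 p2 : Char) (n l a) (hn : n ≠ [])
    (h : (replF p1 p2 n l).head? = some a) : l.head? = some a ∨ n.head? = some a := by
  cases l with
  | nil => simp [replF] at h
  | cons c t =>
      cases t with
      | nil => simp [replF] at h; simp [h]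
      | cons d t' =>
          by_cases hm : c = p1 ∧ d = p2
          · right
            rcases hm with ⟨h1, h2⟩
            subst h1; subst h2
            rw [replF_match] at h
            cases n with
            | nil => exact absurd rfl hn
            | cons x xs => simpa using h
          · left
            rw [show replF p1 p2 n (c :: d :: t') = c :: replF p1 p2 n (d :: t') by simp [replF, hm]] at h
            simpa using h

-- PySem.Chars.replace for a two-character pattern IS replF
lemma replF_cons_cons_ne₂ (p1 p2 c d : Char) (n l) (h : d ≠ p2) :
    replF p1 p2 n (c :: d :: l) = c :: replF p1 p2 n (d :: l) := by
  simp [replF, h]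

lemma go_eq_replF (p1 p2 : Char) (n : List Char) :
    ∀ fuel l acc, l.length ≤ fuel →
      PySem.Chars.replace.go [p1, p2] n fuel l acc = acc.reverse ++ replF p1 p2 n l := by
  intro fuel
  induction fuel with
  | zero => intro l acc h; simp at h; subst h; simp [PySem.Chars.replace.go, replF]
  | succ f ih =>
      intro l acc h
      cases l with
      | nil => simp [PySem.Chars.replace.go, replF]
      | cons c t =>
          rw [PySem.Chars.replace.go]
          by_cases hm : List.isPrefixOf [p1, p2] (c :: t) = true
          · simp only [hm, if_true]
            cases t with
            | nil => simp [List.isPrefixOf] at hm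
            | cons d t' =>
                have hcd : p1 = c ∧ p2 = d := by
                  simpa [List.isPrefixOf, and_assoc] using hm
                obtain ⟨hc, hd⟩ := hcd; subst hc; subst hd
                have hlen : t'.length ≤ f := by simp at h; omega
                rw [show List.drop (List.length [p1,p2]) (p1 :: p2 :: t') = t' from rfl]
                rw [ih t' (n.reverse ++ acc) hlen]
                simp [replF]
          · rw [if_neg hm]
            have hlen : t.length ≤ f := by simp at h; omega
            rw [ih t (c :: acc) hlen]
            have : replF p1 p2 n (c :: t) = c :: replF p1 p2 n t := by
              cases t with
              | nil => simp [replF]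
              | cons d t' =>
                  have : ¬ (c = p1 ∧ d = p2) := by
                    intro ⟨h1, h2⟩; subst h1; subst h2; simp [List.isPrefixOf] at hm
                  simp [replF, this]
            rw [this]; simp

lemma replace_eq_replF (p1 p2 : Char) (n l : List Char) :
    PySem.Chars.replace l [p1, p2] n = replF p1 p2 n l := by
  rw [PySem.Chars.replace]
  simp [go_eq_replF p1 p2 n l.length l [] le_rfl]

-- the eight passes of A, in A's order, as data
def passes : List (Char × Char × List Char) :=
  [('k','i',['T']), ('k','I',['T','i']), ('k','j',['T']), ('k','y',['T']),
   ('g','i',['D']), ('g','j',['D']), ('g','y',['D']), ('g','I',['D','i'])]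

def appP (ps : List (Char × Char × List Char)) (l : List Char) : List Char :=
  ps.foldl (fun acc p => replF p.1 p.2.1 p.2.2 acc) l

def nest (l : List Char) : List Char := appP passes l

lemma appP_cons (p ps l) : appP (p :: ps) l = appP ps (replF p.1 p.2.1 p.2.2 l) := rfl

lemma appP_nil_arg : ∀ ps, appP ps [] = [] := by
  intro ps; induction ps with
  | nil => rfl
  | cons p ps ih => rw [appP_cons, show replF p.1 p.2.1 p.2.2 [] = [] from by simp [replF], ih]

lemma appP_single (ps c) : appP ps [c] = [c] := by
  induction ps with
  | nil => rfl
  | cons p ps ih => rw [appP_cons, show replF p.1 p.2.1 p.2.2 [c] = [c] from by simp [replF], ih]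

lemma appP_skip (ps c l) (h : ∀ p ∈ ps, c ≠ p.1) : appP ps (c :: l) = c :: appP ps l := by
  induction ps generalizing l with
  | nil => rfl
  | cons p ps ih =>
      rw [appP_cons, replF_cons_ne _ _ _ _ _ (h p (by simp)), ih _ (fun q hq => h q (by simp [hq])),
          appP_cons]

-- every head reachable in an intermediate pass: the original head or a replacement head
def HeadOK (d : Char) (X : List Char) : Prop := ∀ a, X.head? = some a → a = d ∨ a = 'T' ∨ a = 'D'

lemma headOK_chain (p1 p2 d : Char) (n : List Char) (hn : n ≠ [])
    (hh : ∀ a, n.head? = some a → a = 'T' ∨ a = 'D') (X) (H : HeadOK d X) :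
    HeadOK d (replF p1 p2 n X) := by
  intro a h
  rcases replF_head_mem p1 p2 n X a hn h with h' | h'
  · exact H a h'
  · rcases hh a h' with h'' | h''
    · exact Or.inr (Or.inl h'')
    · exact Or.inr (Or.inr h'')

lemma appP_skip' (ps) (c d : Char) (X) (H : HeadOK d X)
    (hps : ∀ p ∈ ps, c ≠ p.1 ∨ (p.2.1 ≠ d ∧ p.2.1 ≠ 'T' ∧ p.2.1 ≠ 'D'))
    (hn : ∀ p ∈ ps, p.2.2 ≠ [] ∧ (∀ a, p.2.2.head? = some a → a = 'T' ∨ a = 'D')) :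
    appP ps (c :: X) = c :: appP ps X := by
  induction ps generalizing X with
  | nil => rfl
  | cons p ps ih =>
      have hstep : replF p.1 p.2.1 p.2.2 (c :: X) = c :: replF p.1 p.2.1 p.2.2 X := by
        rcases hps p (by simp) with h | ⟨ha, hb, hc⟩
        · exact replF_cons_ne _ _ _ _ _ h
        · refine replF_cons_head _ _ _ _ _ (fun hcon => ?_)
          rcases H _ hcon with h' | h' | h'
          · exact ha h'
          · exact hb h'
          · exact hc h'
      rw [appP_cons, hstep, appP_cons,
          ih _ (headOK_chain _ _ _ _ (hn p (by simp)).1 (hn p (by simp)).2 _ H)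
            (fun q hq => hps q (by simp [hq])) (fun q hq => hn q (by simp [hq]))]

lemma appP_skip2 (ps c d l) (h : ∀ p ∈ ps, (c ≠ p.1 ∨ d ≠ p.2.1) ∧ d ≠ p.1) :
    appP ps (c :: d :: l) = c :: d :: appP ps l := by
  induction ps generalizing l with
  | nil => rfl
  | cons p ps ih =>
      have hstep : replF p.1 p.2.1 p.2.2 (c :: d :: l) = c :: d :: replF p.1 p.2.1 p.2.2 l := by
        have h2 : replF p.1 p.2.1 p.2.2 (d :: l) = d :: replF p.1 p.2.1 p.2.2 l :=
          replF_cons_ne _ _ _ _ _ (h p (by simp)).2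
        rcases (h p (by simp)).1 with h1 | h1
        · rw [replF_cons_ne _ _ _ _ _ h1, h2]
        · rw [replF_cons_cons_ne₂ _ _ _ _ _ _ h1, h2]
      rw [appP_cons, hstep, ih _ (fun q hq => h q (by simp [hq])), appP_cons]

-- dictionary-lookup facts for B's table
lemma get?_head_ne (c : Char) (l : List Char) (h1 : c ≠ 'k') (h2 : c ≠ 'g') :
    palDictAlt.get? (c :: l) = none := by
  simp [palDictAlt, PySem.Dict.get?, Ne.symm h1, Ne.symm h2]

lemma get?_single (c : Char) : palDictAlt.get? [c] = none := by
  simp [palDictAlt, PySem.Dict.get?]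

lemma get?_k_none (d : Char) (h1 : d ≠ 'i') (h2 : d ≠ 'I') (h3 : d ≠ 'j') (h4 : d ≠ 'y') :
    palDictAlt.get? ['k', d] = none := by
  simp [palDictAlt, PySem.Dict.get?, Ne.symm h1, Ne.symm h2, Ne.symm h3, Ne.symm h4]

lemma get?_g_none (d : Char) (h1 : d ≠ 'i') (h2 : d ≠ 'I') (h3 : d ≠ 'j') (h4 : d ≠ 'y') :
    palDictAlt.get? ['g', d] = none := by
  simp [palDictAlt, PySem.Dict.get?, Ne.symm h1, Ne.symm h2, Ne.symm h3, Ne.symm h4]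

-- one-step equations for altGo
lemma altGo_nil : altGo [] = [] := by rw [altGo]

lemma altGo_single (c : Char) : altGo [c] = [c] := by
  rw [altGo]; simp [get?_single, altGo_nil]

lemma altGo_cons_none (c d : Char) (t) (h : palDictAlt.get? [c, d] = none) :
    altGo (c :: d :: t) = c :: altGo (d :: t) := by
  rw [altGo]; simp [h]

lemma altGo_cons_some (c d : Char) (t rep) (h : palDictAlt.get? [c, d] = some rep) :
    altGo (c :: d :: t) = rep ++ altGo t := by
  rw [altGo]; simp [h]

lemma appP_append (ps qs l) : appP (ps ++ qs) l = appP qs (appP ps l) := by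
  simp [appP, List.foldl_append]

lemma appP_nilps (l : List Char) : appP [] l = l := rfl

lemma head0 (d : Char) (t) : HeadOK d (d :: t) := fun _ h => Or.inl (by simpa [eq_comm] using h)

lemma hn_passes : ∀ p ∈ passes, p.2.2 ≠ [] ∧ (∀ a, p.2.2.head? = some a → a = 'T' ∨ a = 'D') := by
  intro p hp
  simp only [passes, List.mem_cons, List.not_mem_nil, or_false] at hp
  rcases hp with rfl|rfl|rfl|rfl|rfl|rfl|rfl|rfl <;>
    exact ⟨by decide, fun a h => by simp at h; simp [← h]⟩

lemma hps_k (d : Char) (h1 : d ≠ 'i') (h2 : d ≠ 'I') (h3 : d ≠ 'j') (h4 : d ≠ 'y') :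
    ∀ p ∈ passes, 'k' ≠ p.1 ∨ (p.2.1 ≠ d ∧ p.2.1 ≠ 'T' ∧ p.2.1 ≠ 'D') := by
  intro p hp
  simp only [passes, List.mem_cons, List.not_mem_nil, or_false] at hp
  rcases hp with rfl|rfl|rfl|rfl|rfl|rfl|rfl|rfl
  · exact Or.inr ⟨Ne.symm h1, by decide, by decide⟩
  · exact Or.inr ⟨Ne.symm h2, by decide, by decide⟩
  · exact Or.inr ⟨Ne.symm h3, by decide, by decide⟩
  · exact Or.inr ⟨Ne.symm h4, by decide, by decide⟩
  · exact Or.inl (by decide)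
  · exact Or.inl (by decide)
  · exact Or.inl (by decide)
  · exact Or.inl (by decide)

lemma hps_g (d : Char) (h1 : d ≠ 'i') (h2 : d ≠ 'I') (h3 : d ≠ 'j') (h4 : d ≠ 'y') :
    ∀ p ∈ passes, 'g' ≠ p.1 ∨ (p.2.1 ≠ d ∧ p.2.1 ≠ 'T' ∧ p.2.1 ≠ 'D') := by
  intro p hp
  simp only [passes, List.mem_cons, List.not_mem_nil, or_false] at hp
  rcases hp with rfl|rfl|rfl|rfl|rfl|rfl|rfl|rfl
  · exact Or.inl (by decide)
  · exact Or.inl (by decide)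
  · exact Or.inl (by decide)
  · exact Or.inl (by decide)
  · exact Or.inr ⟨Ne.symm h1, by decide, by decide⟩
  · exact Or.inr ⟨Ne.symm h3, by decide, by decide⟩
  · exact Or.inr ⟨Ne.symm h4, by decide, by decide⟩
  · exact Or.inr ⟨Ne.symm h2, by decide, by decide⟩

lemma hps_other (c : Char) (hk : c ≠ 'k') (hg : c ≠ 'g') : ∀ p ∈ passes, c ≠ p.1 := by
  intro p hp
  simp only [passes, List.mem_cons, List.not_mem_nil, or_false] at hp
  rcases hp with rfl|rfl|rfl|rfl|rfl|rfl|rfl|rfl <;> first | exact hk | exact hg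

-- the single pass computes the eight sequential passes
lemma nest_eq_altGo : ∀ l : List Char, nest l = altGo l
  | [] => by
      simp only [nest, appP_nil_arg, altGo_nil]
  | [c] => by
      simp only [nest, appP_single, altGo_single]
  | c :: d :: t => by
      by_cases hk : c = 'k'
      · subst hk
        by_cases h1 : d = 'i'
        · subst h1
          have R : nest ('k'::'i'::t) = 'T' :: nest t := by
            simp only [nest, passes]
            rw [appP_cons, replF_match, List.singleton_append,
                appP_skip _ _ _ (by decide), ← appP_cons]
          rw [R, nest_eq_altGo t, altGo_cons_some _ _ _ ['T'] rfl, List.singleton_append]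
        · by_cases h2 : d = 'I'
          · subst h2
            have R : nest ('k'::'I'::t) = 'T' :: 'i' :: nest t := by
              simp only [nest, passes]
              rw [appP_cons, replF_cons_cons_ne₂ _ _ _ _ _ _ (by decide),
                  replF_cons_ne _ _ _ _ _ (by decide),
                  appP_cons, replF_match, List.cons_append, List.singleton_append,
                  appP_skip2 _ _ _ _ (by decide), ← appP_cons, ← appP_cons]
            rw [R, nest_eq_altGo t, altGo_cons_some _ _ _ ['T','i'] rfl,
                List.cons_append, List.singleton_append]
          · by_cases h3 : d = 'j'
            · subst h3
              have R : nest ('k'::'j'::t) = 'T' :: nest t := by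
                simp only [nest, passes]
                rw [appP_cons, replF_cons_cons_ne₂ _ _ _ _ _ _ (by decide),
                    replF_cons_ne _ _ _ _ _ (by decide),
                    appP_cons, replF_cons_cons_ne₂ _ _ _ _ _ _ (by decide),
                    replF_cons_ne _ _ _ _ _ (by decide),
                    appP_cons, replF_match, List.singleton_append,
                    appP_skip _ _ _ (by decide), ← appP_cons, ← appP_cons, ← appP_cons]
              rw [R, nest_eq_altGo t, altGo_cons_some _ _ _ ['T'] rfl, List.singleton_append]
            · by_cases h4 : d = 'y'
              · subst h4
                have R : nest ('k'::'y'::t) = 'T' :: nest t := by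
                  simp only [nest, passes]
                  rw [appP_cons, replF_cons_cons_ne₂ _ _ _ _ _ _ (by decide),
                      replF_cons_ne _ _ _ _ _ (by decide),
                      appP_cons, replF_cons_cons_ne₂ _ _ _ _ _ _ (by decide),
                      replF_cons_ne _ _ _ _ _ (by decide),
                      appP_cons, replF_cons_cons_ne₂ _ _ _ _ _ _ (by decide),
                      replF_cons_ne _ _ _ _ _ (by decide),
                      appP_cons, replF_match, List.singleton_append,
                      appP_skip _ _ _ (by decide), ← appP_cons, ← appP_cons, ← appP_cons, ← appP_cons]
                rw [R, nest_eq_altGo t, altGo_cons_some _ _ _ ['T'] rfl, List.singleton_append]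
              · have R : nest ('k'::d::t) = 'k' :: nest (d::t) := by
                  simp only [nest]
                  exact appP_skip' passes 'k' d (d::t) (head0 d t) (hps_k d h1 h2 h3 h4) hn_passes
                rw [R, nest_eq_altGo (d::t), altGo_cons_none _ _ _ (get?_k_none d h1 h2 h3 h4)]
      · by_cases hg : c = 'g'
        · subst hg
          by_cases h1 : d = 'i'
          · subst h1
            have R : nest ('g'::'i'::t) = 'D' :: nest t := by
              simp only [nest]
              rw [show passes = ([('k','i',['T']),('k','I',['T','i']),('k','j',['T']),('k','y',['T'])]
                    ++ [('g','i',['D']),('g','j',['D']),('g','y',['D']),('g','I',['D','i'])]) from rfl,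
                  appP_append, appP_append, appP_skip2 _ _ _ _ (by decide),
                  appP_cons, replF_match, List.singleton_append,
                  appP_skip _ _ _ (by decide), ← appP_cons]
            rw [R, nest_eq_altGo t, altGo_cons_some _ _ _ ['D'] rfl, List.singleton_append]
          · by_cases h2 : d = 'j'
            · subst h2
              have R : nest ('g'::'j'::t) = 'D' :: nest t := by
                simp only [nest]
                rw [show passes = ([('k','i',['T']),('k','I',['T','i']),('k','j',['T']),('k','y',['T']),('g','i',['D'])]
                      ++ [('g','j',['D']),('g','y',['D']),('g','I',['D','i'])]) from rfl,
                    appP_append, appP_append, appP_skip2 _ _ _ _ (by decide),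
                    appP_cons, replF_match, List.singleton_append,
                    appP_skip _ _ _ (by decide), ← appP_cons]
              rw [R, nest_eq_altGo t, altGo_cons_some _ _ _ ['D'] rfl, List.singleton_append]
            · by_cases h3 : d = 'y'
              · subst h3
                have R : nest ('g'::'y'::t) = 'D' :: nest t := by
                  simp only [nest]
                  rw [show passes = ([('k','i',['T']),('k','I',['T','i']),('k','j',['T']),('k','y',['T']),('g','i',['D']),('g','j',['D'])]
                        ++ [('g','y',['D']),('g','I',['D','i'])]) from rfl,
                      appP_append, appP_append, appP_skip2 _ _ _ _ (by decide),
                      appP_cons, replF_match, List.singleton_append,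
                      appP_skip _ _ _ (by decide), ← appP_cons]
                rw [R, nest_eq_altGo t, altGo_cons_some _ _ _ ['D'] rfl, List.singleton_append]
              · by_cases h4 : d = 'I'
                · subst h4
                  have R : nest ('g'::'I'::t) = 'D' :: 'i' :: nest t := by
                    simp only [nest]
                    rw [show passes = ([('k','i',['T']),('k','I',['T','i']),('k','j',['T']),('k','y',['T']),('g','i',['D']),('g','j',['D']),('g','y',['D'])]
                          ++ [('g','I',['D','i'])]) from rfl,
                        appP_append, appP_append, appP_skip2 _ _ _ _ (by decide),
                        appP_cons, replF_match, appP_nilps, appP_cons]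
                    rfl
                  rw [R, nest_eq_altGo t, altGo_cons_some _ _ _ ['D','i'] rfl,
                      List.cons_append, List.singleton_append]
                · have R : nest ('g'::d::t) = 'g' :: nest (d::t) := by
                    simp only [nest]
                    exact appP_skip' passes 'g' d (d::t) (head0 d t) (hps_g d h1 h4 h2 h3) hn_passes
                  rw [R, nest_eq_altGo (d::t), altGo_cons_none _ _ _ (get?_g_none d h1 h4 h2 h3)]
        · have R : nest (c::d::t) = c :: nest (d::t) := by
            simp only [nest]
            exact appP_skip passes c (d::t) (hps_other c hk hg)
          rw [R, nest_eq_altGo (d::t), altGo_cons_none _ _ _ (get?_head_ne c [d] hk hg)]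
termination_by l => l.length
decreasing_by all_goals first | (simp; omega) | simp

lemma ports_agree (word : String) : palatal_assim word = palatal_assim_alt word := by
  have hitems : palDict.items = [("ki","T"),("kI","Ti"),("kj","T"),("ky","T"),
                                 ("gi","D"),("gj","D"),("gy","D"),("gI","Di")] := rfl
  rw [palatal_assim, palatal_assim_alt, hitems, ← nest_eq_altGo]
  simp only [List.foldl_cons, List.foldl_nil]
  simp only [PySem.Str.replace, String.toList_ofList,
             show ("ki" : String).toList = ['k','i'] from rfl, show ("T" : String).toList = ['T'] from rfl,
             show ("kI" : String).toList = ['k','I'] from rfl, show ("Ti" : String).toList = ['T','i'] from rfl,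
             show ("kj" : String).toList = ['k','j'] from rfl, show ("ky" : String).toList = ['k','y'] from rfl,
             show ("gi" : String).toList = ['g','i'] from rfl, show ("D" : String).toList = ['D'] from rfl,
             show ("gj" : String).toList = ['g','j'] from rfl, show ("gy" : String).toList = ['g','y'] from rfl,
             show ("gI" : String).toList = ['g','I'] from rfl, show ("Di" : String).toList = ['D','i'] from rfl,
             replace_eq_replF]
  rfl

theorem palatal_assim_spec : Claim_equal_palatal_assim := by
  intro word _
  unfold Spec_palatal_assim
  exact ports_agree word
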